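-- pv_equiv track=rewrite | github.com/pjrice/BCB-Modeling | WM_old/models/nBack/testing_seenSlotModel_1cond.py | compute_model_acc_combined2
-- ===== SOURCE A (Python) =====
-- def compute_model_acc_combined2 (correctResponses,modelResponses,correctRespChunks,retrievalRespChunks,targetTypes):
--
--
--     keypressRespAccVec = [1 if i[0]==j[0] else 0 for i,j in zip(correctResponses,modelResponses)]
--
--     chunkAccVec = [1 if i==j[0] else 0 for i,j in zip(correctRespChunks,retrievalRespChunks)]
--
--     combinedAccVec = [i if j==1 else 0 for i,j in zip(keypressRespAccVec,chunkAccVec)]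
--
--     combinedAccVecTT = [[i,j] for i,j in zip(combinedAccVec,targetTypes)]
--
--     tarAccVec = [x[0] for x in combinedAccVecTT if x[1]=='target']
--     lurAccVec = [x[0] for x in combinedAccVecTT if x[1]=='lure']
--     nlrAccVec = [x[0] for x in combinedAccVecTT if x[1]=='nonlure']
--
--     return([combinedAccVec,tarAccVec,lurAccVec,nlrAccVec])
-- ===== SOURCE B (Python) =====
-- def compute_model_acc_combined2(correctResponses, modelResponses, correctRespChunks, retrievalRespChunks, targetTypes):
--     combinedAccVec = [1 if (i[0] == j[0] and c == r[0]) else 0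
--                       for i, j, c, r in zip(correctResponses, modelResponses,
--                                             correctRespChunks, retrievalRespChunks)]
--     tarAccVec = []
--     lurAccVec = []
--     nlrAccVec = []
--     for acc, t in zip(combinedAccVec, targetTypes):
--         if t == 'target':
--             tarAccVec.append(acc)
--         elif t == 'lure':
--             lurAccVec.append(acc)
--         elif t == 'nonlure':
--             nlrAccVec.append(acc)
--     return [combinedAccVec, tarAccVec, lurAccVec, nlrAccVec]
-- ===== Notes on version B (the rewrite author's own statement) =====
-- stated objective: simpler
-- what changed: Replaces A's three staged accuracy vectors and three separate filter scans over a pairing list by one fused comprehension computing the combined score directly plus a single grouping pass that dispatches each score into its target-type bucket; Pre_ excludes only inputs where A raises IndexError on an empty inner response/chunk list.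
import Mathlib
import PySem

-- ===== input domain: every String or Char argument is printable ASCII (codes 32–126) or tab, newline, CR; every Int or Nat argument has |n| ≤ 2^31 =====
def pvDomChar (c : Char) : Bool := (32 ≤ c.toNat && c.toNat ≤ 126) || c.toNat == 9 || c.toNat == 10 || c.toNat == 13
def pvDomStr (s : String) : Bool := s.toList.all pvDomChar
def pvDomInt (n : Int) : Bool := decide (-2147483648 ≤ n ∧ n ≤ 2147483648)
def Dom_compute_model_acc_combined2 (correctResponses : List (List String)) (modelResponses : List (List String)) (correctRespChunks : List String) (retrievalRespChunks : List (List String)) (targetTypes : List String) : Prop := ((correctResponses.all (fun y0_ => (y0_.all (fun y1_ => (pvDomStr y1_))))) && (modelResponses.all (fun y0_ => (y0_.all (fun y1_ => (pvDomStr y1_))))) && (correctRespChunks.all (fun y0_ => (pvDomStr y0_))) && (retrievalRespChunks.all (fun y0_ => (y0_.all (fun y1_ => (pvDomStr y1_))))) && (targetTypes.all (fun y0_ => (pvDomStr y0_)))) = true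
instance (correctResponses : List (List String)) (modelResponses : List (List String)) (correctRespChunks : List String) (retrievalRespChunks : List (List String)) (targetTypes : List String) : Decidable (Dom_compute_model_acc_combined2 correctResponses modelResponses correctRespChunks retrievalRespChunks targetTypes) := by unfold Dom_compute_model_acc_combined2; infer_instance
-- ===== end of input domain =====

-- B fuses A's three staged accuracy vectors into one comprehension and replaces A's three filter scans by a single grouping-dispatch pass (objective: simpler); same return value on all of Pre_.

-- ===== PORT A =====
-- i[0] etc. ported as (pyGet? · 0).getD ""; Pre_ excludes exactly the inputs where the Python raises IndexError there.
def compute_model_acc_combined2 (correctResponses : List (List String)) (modelResponses : List (List String)) (correctRespChunks : List String) (retrievalRespChunks : List (List String)) (targetTypes : List String) : List (List Int) :=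
  let keypressRespAccVec : List Int := (correctResponses.zip modelResponses).map
    (fun p => if (PySem.List.pyGet? p.1 0).getD "" = (PySem.List.pyGet? p.2 0).getD "" then 1 else 0)
  let chunkAccVec : List Int := (correctRespChunks.zip retrievalRespChunks).map
    (fun p => if p.1 = (PySem.List.pyGet? p.2 0).getD "" then 1 else 0)
  let combinedAccVec : List Int := (keypressRespAccVec.zip chunkAccVec).map
    (fun p => if p.2 = 1 then p.1 else 0)
  let combinedAccVecTT : List (Int × String) := combinedAccVec.zip targetTypes
  let tarAccVec : List Int := (combinedAccVecTT.filter (fun x => x.2 = "target")).map (fun x => x.1)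
  let lurAccVec : List Int := (combinedAccVecTT.filter (fun x => x.2 = "lure")).map (fun x => x.1)
  let nlrAccVec : List Int := (combinedAccVecTT.filter (fun x => x.2 = "nonlure")).map (fun x => x.1)
  [combinedAccVec, tarAccVec, lurAccVec, nlrAccVec]

-- ===== PORT B =====
-- Source B's four-way zip comprehension, as the obvious four-list structural recursion.
def altComb : List (List String) → List (List String) → List String → List (List String) → List Int
  | i :: cr, j :: mr, c :: crc, r :: rrc =>
    (if (PySem.List.pyGet? i 0).getD "" = (PySem.List.pyGet? j 0).getD ""
        ∧ c = (PySem.List.pyGet? r 0).getD "" then (1 : Int) else 0) :: altComb cr mr crc rrc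
  | _, _, _, _ => []

-- Source B's grouping loop over zip(combinedAccVec, targetTypes), building the three buckets.
def altGroup : List (Int × String) → List Int × List Int × List Int
  | [] => ([], [], [])
  | (acc, t) :: rest =>
    let r := altGroup rest
    if t = "target" then (acc :: r.1, r.2.1, r.2.2)
    else if t = "lure" then (r.1, acc :: r.2.1, r.2.2)
    else if t = "nonlure" then (r.1, r.2.1, acc :: r.2.2)
    else r

def compute_model_acc_combined2_alt (correctResponses : List (List String)) (modelResponses : List (List String)) (correctRespChunks : List String) (retrievalRespChunks : List (List String)) (targetTypes : List String) : List (List Int) :=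
  let combinedAccVec := altComb correctResponses modelResponses correctRespChunks retrievalRespChunks
  let g := altGroup (combinedAccVec.zip targetTypes)
  [combinedAccVec, g.1, g.2.1, g.2.2]

-- ===== PRECONDITION & SPEC =====
-- Pre_ excludes exactly the inputs on which Python A raises IndexError: an empty inner
-- list at a zipped correctResponses/modelResponses position, or an empty inner list at a
-- zipped retrievalRespChunks position.
def Pre_compute_model_acc_combined2 (correctResponses : List (List String)) (modelResponses : List (List String)) (correctRespChunks : List String) (retrievalRespChunks : List (List String)) (_targetTypes : List String) : Prop :=
  (∀ p ∈ correctResponses.zip modelResponses, p.1 ≠ [] ∧ p.2 ≠ []) ∧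
  (∀ p ∈ correctRespChunks.zip retrievalRespChunks, p.2 ≠ [])
instance (correctResponses : List (List String)) (modelResponses : List (List String)) (correctRespChunks : List String) (retrievalRespChunks : List (List String)) (targetTypes : List String) : Decidable (Pre_compute_model_acc_combined2 correctResponses modelResponses correctRespChunks retrievalRespChunks targetTypes) := by unfold Pre_compute_model_acc_combined2; infer_instance

def pvWitness_compute_model_acc_combined2 : List (List String) × List (List String) × List String × List (List String) × List String :=
  ([["j"], ["k"]], [["j"], ["f"]], ["c1", "c2"], [["c1"], ["c9"]], ["target", "lure"])

def Spec_compute_model_acc_combined2 (correctResponses : List (List String)) (modelResponses : List (List String)) (correctRespChunks : List String) (retrievalRespChunks : List (List String)) (targetTypes : List String) (out : List (List Int)) : Prop := out = compute_model_acc_combined2_alt correctResponses modelResponses correctRespChunks retrievalRespChunks targetTypes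
instance (correctResponses : List (List String)) (modelResponses : List (List String)) (correctRespChunks : List String) (retrievalRespChunks : List (List String)) (targetTypes : List String) (out : List (List Int)) : Decidable (Spec_compute_model_acc_combined2 correctResponses modelResponses correctRespChunks retrievalRespChunks targetTypes out) := by unfold Spec_compute_model_acc_combined2; infer_instance

-- ===== CLAIM =====
def Claim_equal_compute_model_acc_combined2 : Prop := ∀ (correctResponses : List (List String)) (modelResponses : List (List String)) (correctRespChunks : List String) (retrievalRespChunks : List (List String)) (targetTypes : List String), Dom_compute_model_acc_combined2 correctResponses modelResponses correctRespChunks retrievalRespChunks targetTypes → Pre_compute_model_acc_combined2 correctResponses modelResponses correctRespChunks retrievalRespChunks targetTypes → Spec_compute_model_acc_combined2 correctResponses modelResponses correctRespChunks retrievalRespChunks targetTypes (compute_model_acc_combined2 correctResponses modelResponses correctRespChunks retrievalRespChunks targetTypes)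

-- ===== LEMMAS AND PROOFS =====

-- A's combinedAccVec, as one four-way recursion (used only in the proofs).
def combOf (correctResponses modelResponses : List (List String)) (correctRespChunks : List String) (retrievalRespChunks : List (List String)) : List Int :=
  ((((correctResponses.zip modelResponses).map
      (fun p => if (PySem.List.pyGet? p.1 0).getD "" = (PySem.List.pyGet? p.2 0).getD "" then (1 : Int) else 0)).zip
    ((correctRespChunks.zip retrievalRespChunks).map
      (fun p => if p.1 = (PySem.List.pyGet? p.2 0).getD "" then (1 : Int) else 0))).map
    (fun p => if p.2 = 1 then p.1 else 0))

theorem combOf_cons (i j : List String) (c : String) (r : List String)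
    (cr mr : List (List String)) (crc : List String) (rrc : List (List String)) :
    combOf (i :: cr) (j :: mr) (c :: crc) (r :: rrc) =
      (if (PySem.List.pyGet? i 0).getD "" = (PySem.List.pyGet? j 0).getD ""
          ∧ c = (PySem.List.pyGet? r 0).getD "" then (1 : Int) else 0) :: combOf cr mr crc rrc := by
  simp only [combOf, List.zip_cons_cons, List.map_cons]
  congr 1
  by_cases h1 : (PySem.List.pyGet? i 0).getD "" = (PySem.List.pyGet? j 0).getD "" <;>
    by_cases h2 : c = (PySem.List.pyGet? r 0).getD "" <;> simp [h1, h2]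

-- B's fused comprehension computes exactly A's combinedAccVec.
theorem altComb_eq_combOf (cr : List (List String)) : ∀ (mr : List (List String))
    (crc : List String) (rrc : List (List String)),
    altComb cr mr crc rrc = combOf cr mr crc rrc := by
  induction cr with
  | nil => intro mr crc rrc; simp [altComb, combOf]
  | cons i cr ih =>
    intro mr crc rrc
    cases mr with
    | nil => simp [altComb, combOf]
    | cons j mr =>
      cases crc with
      | nil => simp [altComb, combOf]
      | cons c crc =>
        cases rrc with
        | nil => simp [altComb, combOf]
        | cons r rrc => rw [combOf_cons, altComb, ih]

-- B's grouping pass produces exactly A's three filtered projections.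
theorem altGroup_spec (l : List (Int × String)) :
    altGroup l =
      ((l.filter (fun x => x.2 = "target")).map (fun x => x.1),
       (l.filter (fun x => x.2 = "lure")).map (fun x => x.1),
       (l.filter (fun x => x.2 = "nonlure")).map (fun x => x.1)) := by
  induction l with
  | nil => simp [altGroup]
  | cons p rest ih =>
    obtain ⟨acc, t⟩ := p
    simp only [altGroup, ih, List.filter_cons]
    by_cases h1 : t = "target" <;> by_cases h2 : t = "lure" <;> by_cases h3 : t = "nonlure" <;>
      simp [h1, h2, h3]

-- ===== VERDICT =====
theorem compute_model_acc_combined2_spec : Claim_equal_compute_model_acc_combined2 := by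
  intro cr mr crc rrc tt _ _
  unfold Spec_compute_model_acc_combined2 compute_model_acc_combined2 compute_model_acc_combined2_alt
  simp only [altComb_eq_combOf, altGroup_spec, combOf]
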